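-- pv_equiv track=rewrite | github.com/ghlyffe/adventofcode | y2015/day11/day11.py | str_inc
-- ===== SOURCE A (Python) =====
-- def letter_inc(letter):
--     """
--     >>> letter_inc('a')
--     'b'
--     >>> letter_inc('z')
--     'a'
--     """
--     return chr((((ord(letter)-97)+1)%26)+97)
--
-- def str_inc(s):
--     """
--     >>> str_inc('aaa')
--     'aab'
--     >>> str_inc('aaz')
--     'aba'
--     >>> str_inc('zzz')
--     'aaaa'
--     """
--     out = ""
--     inc = True
--     for i in range(len(s)-1,-1,-1):
--         if inc:
--             la = s[i]
--             lb = letter_inc(la)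
--             if lb in ['i','l','o']:
--                 lb = letter_inc(lb)
--             if lb > la:
--                 inc = False
--             out += lb
--         else:
--             out += s[i]
--     if inc:
--         out += 'a'
--     return out[::-1]
-- ===== SOURCE B (Python) =====
-- def _step(ch):
--     n = (ord(ch) - 97 + 1) % 26
--     c = chr(n + 97)
--     if c in 'ilo':
--         c = chr((n + 1) % 26 + 97)
--     return c
--
-- def str_inc(s):
--     # Pass 1: indices whose char absorbs a carry (its successor is strictly larger).
--     idx = [i for i, c in enumerate(s) if _step(c) > c]
--     if not idx:
--         # every position carries: all chars roll over and a leading 'a' appears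
--         return 'a' + ''.join(_step(c) for c in s)
--     j = idx[-1]
--     # everything left of the last absorbing position is untouched; from it on, stepped
--     return s[:j] + ''.join(_step(c) for c in s[j:])
-- ===== Notes on version B (the rewrite author's own statement) =====
-- stated objective: alternative
-- what changed: A makes one stateful right-to-left pass carrying an inc flag, appending every (changed or copied) char to an accumulator string and reversing at the end; B has no carry state at all: it first lists every position whose char absorbs a carry (its stepped successor is strictly larger), takes the last such position j, and assembles s[:j] unchanged plus the stepped suffix (or 'a' plus the fully stepped string when no position absorbs).
import Mathlib
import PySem

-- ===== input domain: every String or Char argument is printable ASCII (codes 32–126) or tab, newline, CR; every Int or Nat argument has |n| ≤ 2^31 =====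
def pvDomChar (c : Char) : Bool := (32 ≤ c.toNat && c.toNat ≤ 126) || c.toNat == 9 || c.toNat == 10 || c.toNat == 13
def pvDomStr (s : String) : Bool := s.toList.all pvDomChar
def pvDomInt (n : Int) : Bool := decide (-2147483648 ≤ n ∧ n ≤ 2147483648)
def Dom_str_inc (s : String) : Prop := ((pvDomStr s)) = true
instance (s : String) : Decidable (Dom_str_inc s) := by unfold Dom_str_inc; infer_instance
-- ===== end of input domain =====

-- B replaces A's stateful right-to-left fold (carry flag + string accumulator + final reverse)
-- by two stateless passes: list all positions whose char absorbs a carry, take the last one j,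
-- and return s[:j] unchanged plus the stepped suffix (objective: alternative decomposition).

-- ===== PORT A =====
-- letter_inc(letter): chr((((ord(letter)-97)+1)%26)+97)
def letterInc (c : Char) : Char :=
  Char.ofNat (PySem.Int.mod ((c.toNat : Int) - 97 + 1) 26 + 97).toNat

-- str_inc from Source A: for i in range(len(s)-1,-1,-1) with the (out, inc) state, then out[::-1]
def str_inc (s : String) : String :=
  let chars := s.toList
  let st := (PySem.List.pyRange (PySem.Str.len s - 1) (-1) (-1)).foldl
    (fun (st : List Char × Bool) (i : Int) =>
      if st.2 then
        let la := PySem.List.pyGetD chars i 'a'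
        let lb := letterInc la
        let lb := if lb ∈ (['i','l','o'] : List Char) then letterInc lb else lb
        (st.1 ++ [lb], if la < lb then false else st.2)
      else
        (st.1 ++ [PySem.List.pyGetD chars i 'a'], st.2))
    (([] : List Char), true)
  let out := if st.2 then st.1 ++ ['a'] else st.1
  String.mk out.reverse

-- ===== PORT B =====
-- _step(ch) from Source B
def stepB (c : Char) : Char :=
  let n := PySem.Int.mod ((c.toNat : Int) - 97 + 1) 26
  let c1 := Char.ofNat (n + 97).toNat
  if c1 ∈ (['i','l','o'] : List Char) then Char.ofNat (PySem.Int.mod (n + 1) 26 + 97).toNat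
  else c1

-- str_inc from Source B: idx = [i for i, c in enumerate(s) if _step(c) > c]; branch on idx;
-- s[:j] / s[j:] with j = idx[-1] ≥ 0 are exactly take/drop at j
def str_inc_alt (s : String) : String :=
  let cs := s.toList
  let idx := (PySem.List.enumerate cs 0).filterMap
    (fun p => if p.2 < stepB p.2 then some p.1 else none)
  match idx.getLast? with
  | none => String.mk ('a' :: cs.map stepB)
  | some j => String.mk (cs.take j.toNat ++ (cs.drop j.toNat).map stepB)

-- ===== PRECONDITION & SPEC =====
def Spec_str_inc (s : String) (out : String) : Prop := out = str_inc_alt s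
instance (s : String) (out : String) : Decidable (Spec_str_inc s out) := by unfold Spec_str_inc; infer_instance

-- ===== CLAIM (what is proved, stated in full; the proofs are below) =====
def Claim_equal_str_inc : Prop := ∀ (s : String), Dom_str_inc s → Spec_str_inc s (str_inc s)

-- ===== LEMMAS AND PROOFS =====

-- A's loop body, on the character itself (the index i only serves to fetch s[i])
def stepA (st : List Char × Bool) (c : Char) : List Char × Bool :=
  if st.2 then
    let lb := letterInc c
    let lb := if lb ∈ (['i','l','o'] : List Char) then letterInc lb else lb
    (st.1 ++ [lb], if c < lb then false else st.2)
  else (st.1 ++ [c], st.2)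

-- proof-side recursion computing A's loop on the reversed char list:
-- (did the carry run off the left end?, transformed reversed chars)
def strIncGo : List Char → Bool × List Char
  | [] => (true, [])
  | c :: rest =>
    let lb := stepB c
    if c < lb then (false, lb :: rest)
    else
      let p := strIncGo rest
      (p.1, lb :: p.2)

theorem char_toNat_ofNat (n : Nat) (h : Nat.isValidChar n) : (Char.ofNat n).toNat = n := by
  unfold Char.ofNat Char.toNat
  simp [h]

-- A's i/l/o-skipping increment of one char equals B's _step
theorem stepA_char_eq (c : Char) :
    (if letterInc c ∈ (['i','l','o'] : List Char) then letterInc (letterInc c)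
     else letterInc c) = stepB c := by
  have h0 : (0:Int) < 26 := by norm_num
  have hnn := PySem.Int.mod_nonneg ((c.toNat : Int) - 97 + 1) h0
  have hlt := PySem.Int.mod_lt ((c.toNat : Int) - 97 + 1) h0
  simp only [stepB, letterInc]
  set n := PySem.Int.mod ((c.toNat : Int) - 97 + 1) 26 with hn
  have htc : ((Char.ofNat (n + 97).toNat).toNat : Int) = n + 97 := by
    rw [char_toNat_ofNat _ (by left; omega)]
    omega
  rw [htc]
  norm_num

-- once inc is False, A just copies
theorem foldl_stepA_false (r : List Char) (acc : List Char) :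
    r.foldl stepA (acc, false) = (acc ++ r, false) := by
  induction r generalizing acc with
  | nil => simp
  | cons c rest ih =>
    simp only [List.foldl_cons, stepA]
    simpa using ih (acc ++ [c])

-- loop correspondence on the reversed char list
theorem foldl_stepA_go (r : List Char) (acc : List Char) :
    r.foldl stepA (acc, true) = (acc ++ (strIncGo r).2, (strIncGo r).1) := by
  induction r generalizing acc with
  | nil => simp [strIncGo]
  | cons c rest ih =>
    simp only [List.foldl_cons, strIncGo]
    rw [show stepA (acc, true) c =
        (acc ++ [stepB c], if c < stepB c then false else true) by
      simp only [stepA, if_true, ← stepA_char_eq c]]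
    by_cases h : c < stepB c
    · simp only [h, if_true]
      rw [foldl_stepA_false]
      simp
    · simp only [h, if_false]
      rw [ih]
      simp

-- A's index fold equals the fold of stepA over the reversed char list
theorem foldl_range_eq (l : List Char) (st : List Char × Bool) :
    (PySem.List.pyRange ((l.length : Int) - 1) (-1) (-1)).foldl
      (fun st i => stepA st (PySem.List.pyGetD l i 'a')) st
      = l.reverse.foldl stepA st := by
  induction l using List.reverseRecOn generalizing st with
  | nil => simp [PySem.List.pyRange_neg_one_eq_nil]
  | append_singleton l' c ih =>
    have hlen : ((l' ++ [c]).length : Int) - 1 = (l'.length : Int) := by simp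
    rw [hlen, PySem.List.pyRange_neg_one_cons (by omega)]
    simp only [List.foldl_cons, List.reverse_append, List.reverse_singleton,
      List.singleton_append]
    have hc : PySem.List.pyGetD (l' ++ [c]) (l'.length : Int) 'a' = c := by
      rw [PySem.List.pyGetD_eq_getElem _ _ (by omega) (by simp)]
      simp
    rw [hc]
    rw [PySem.List.foldl_congr_mem _ _
        (fun st i => stepA st (PySem.List.pyGetD l' i 'a')) _
      (by
        intro acc x hx
        rw [PySem.List.mem_pyRange_neg_one] at hx
        have hx0 : 0 ≤ x := by omega
        have hxl : x < (l'.length : Int) := by omega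
        show stepA acc (PySem.List.pyGetD (l' ++ [c]) x 'a')
            = stepA acc (PySem.List.pyGetD l' x 'a')
        rw [PySem.List.pyGetD_eq_getElem _ _ hx0 (by simp; omega),
            PySem.List.pyGetD_eq_getElem _ _ hx0 (by omega)]
        congr 1
        exact List.getElem_append_left (by omega))]
    exact ih _

-- the char predicate shared by both characterisations: position absorbs the carry
def carryStop (c : Char) : Bool := c < stepB c

-- closed form of strIncGo in terms of the first absorbing index of the reversed list
theorem strIncGo_spec (r : List Char) :
    strIncGo r = (decide (r.length ≤ r.findIdx carryStop),
      (r.take (r.findIdx carryStop + 1)).map stepB ++ r.drop (r.findIdx carryStop + 1)) := by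
  induction r with
  | nil => simp [strIncGo]
  | cons c rest ih =>
    simp only [strIncGo, List.findIdx_cons, carryStop]
    by_cases h : c < stepB c
    · simp [h, List.length_cons]
    · simp only [h, decide_false, cond_false, if_false, ih, Prod.mk.injEq]
      refine ⟨?_, ?_⟩
      · rw [decide_eq_decide]
        simp only [List.length_cons]
        omega
      · simp [List.take_succ_cons, List.drop_succ_cons]

-- B's index pass: the last absorbing index of cs vs the first absorbing index of cs.reverse
theorem idx_getLast (cs : List Char) :
    (((PySem.List.enumerate cs 0).filterMap
        (fun p => if p.2 < stepB p.2 then some p.1 else none)).getLast?)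
      = if cs.reverse.findIdx carryStop < cs.length
        then some ((cs.length - 1 - cs.reverse.findIdx carryStop : Nat) : Int)
        else none := by
  induction cs using List.reverseRecOn with
  | nil => simp [PySem.List.enumerate_nil]
  | append_singleton l c ih =>
    rw [PySem.List.enumerate_append, List.filterMap_append, List.getLast?_append]
    simp only [PySem.List.enumerate_cons, PySem.List.enumerate_nil, List.reverse_append,
      List.reverse_singleton, List.singleton_append, List.findIdx_cons, carryStop]
    by_cases h : c < stepB c
    · simp [h, List.filterMap]
    · have hle := List.findIdx_le_length (p := carryStop) (xs := l.reverse)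
      simp only [List.length_reverse] at hle
      simp only [h, decide_false, cond_false, List.filterMap_cons, if_false,
        List.filterMap_nil, List.getLast?_nil, Option.none_or, ih,
        List.length_append, List.length_singleton]
      by_cases hk : l.reverse.findIdx carryStop < l.length
      · rw [if_pos hk, if_pos (by omega : l.reverse.findIdx carryStop + 1 < l.length + 1)]
        congr 1
        omega
      · rw [if_neg hk, if_neg (by omega : ¬ l.reverse.findIdx carryStop + 1 < l.length + 1)]

-- ===== VERDICT (by name: the statement is the Claim_ definition above) =====
theorem str_inc_spec : Claim_equal_str_inc := by
  intro s _
  show str_inc s = str_inc_alt s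
  simp only [str_inc, str_inc_alt, PySem.Str.len_eq]
  rw [show (fun (st : List Char × Bool) (i : Int) =>
      if st.2 then
        let la := PySem.List.pyGetD s.toList i 'a'
        let lb := letterInc la
        let lb := if lb ∈ (['i','l','o'] : List Char) then letterInc lb else lb
        (st.1 ++ [lb], if la < lb then false else st.2)
      else (st.1 ++ [PySem.List.pyGetD s.toList i 'a'], st.2))
    = (fun st i => stepA st (PySem.List.pyGetD s.toList i 'a')) from rfl]
  rw [foldl_range_eq, foldl_stepA_go]
  rw [idx_getLast, strIncGo_spec]
  set cs := s.toList with hcs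
  set k := cs.reverse.findIdx carryStop with hk
  have hlen : cs.reverse.length = cs.length := List.length_reverse
  have hle : k ≤ cs.length := by
    have := List.findIdx_le_length (p := carryStop) (xs := cs.reverse)
    omega
  by_cases h : k < cs.length
  · rw [if_pos h]
    have hkd : decide (cs.reverse.length ≤ k) = false := by
      rw [hlen, decide_eq_false_iff_not]
      omega
    have h1 : (cs.reverse.drop (k + 1)).reverse = cs.take (cs.length - 1 - k) := by
      rw [List.reverse_drop, List.reverse_reverse, List.length_reverse]
      congr 1
      omega
    have h2 : (cs.reverse.take (k + 1)).reverse = cs.drop (cs.length - 1 - k) := by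
      rw [List.reverse_take, List.reverse_reverse, List.length_reverse]
      congr 1
      omega
    simp only [hkd, List.nil_append, if_neg (Bool.false_ne_true), List.reverse_append,
      Int.toNat_natCast]
    rw [← List.map_reverse, h1, h2]
  · rw [if_neg h]
    have hkd : decide (cs.reverse.length ≤ k) = true := by
      rw [hlen, decide_eq_true_iff]
      omega
    have htake : cs.reverse.take (k + 1) = cs.reverse := List.take_of_length_le (by omega)
    have hdrop : cs.reverse.drop (k + 1) = [] := List.drop_of_length_le (by omega)
    simp only [hkd, htake, hdrop, List.append_nil, List.nil_append, if_true,
      List.reverse_append, ← List.map_reverse, List.reverse_reverse,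
      List.reverse_singleton, List.singleton_append]
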